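-- pv_equiv track=rewrite | github.com/ignatovskiy/Tagger | utils.py | find_instance_groups
-- ===== SOURCE A (Python) =====
-- def find_instance_groups(instance_labels, groups_json) -> dict:
--     instance_groups = dict()
--
--     for label in instance_labels:
--         temp_groups = []
--
--         for group in groups_json:
--             if label in groups_json[group]:
--                 temp_groups.append(group)
--                 if group not in instance_groups:
--                     instance_groups[group] = instance_labels[label]
--                 else:
--                     instance_groups[group] += instance_labels[label]
--
--         if len(temp_groups) == 0:
--             instance_groups[label] = instance_labels[label]
--
--     return instance_groups
-- ===== SOURCE B (Python) =====
-- def find_instance_groups(instance_labels, groups_json) -> dict: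
--     # Build an inverted index label -> list of groups containing it (group order preserved) once,
--     # then a single pass over the labels; same result as the nested-scan original.
--     inverted = dict()
--     for group, members in groups_json.items():
--         for lab in dict.fromkeys(members):
--             inverted.setdefault(lab, []).append(group)
--
--     instance_groups = dict()
--     for label, weight in instance_labels.items():
--         groups = inverted.get(label, [])
--         if not groups:
--             instance_groups[label] = weight
--         else:
--             for group in groups:
--                 instance_groups[group] = instance_groups.get(group, 0) + weight
--     return instance_groups
-- ===== Notes on version B (the rewrite author's own statement) =====
-- stated objective: faster
-- what changed: B precomputes an inverted index label->groups from groups_json once (preserving group order) and then makes a single pass over the labels, replacing A's per-label rescan of every group's member list.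
import Mathlib
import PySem

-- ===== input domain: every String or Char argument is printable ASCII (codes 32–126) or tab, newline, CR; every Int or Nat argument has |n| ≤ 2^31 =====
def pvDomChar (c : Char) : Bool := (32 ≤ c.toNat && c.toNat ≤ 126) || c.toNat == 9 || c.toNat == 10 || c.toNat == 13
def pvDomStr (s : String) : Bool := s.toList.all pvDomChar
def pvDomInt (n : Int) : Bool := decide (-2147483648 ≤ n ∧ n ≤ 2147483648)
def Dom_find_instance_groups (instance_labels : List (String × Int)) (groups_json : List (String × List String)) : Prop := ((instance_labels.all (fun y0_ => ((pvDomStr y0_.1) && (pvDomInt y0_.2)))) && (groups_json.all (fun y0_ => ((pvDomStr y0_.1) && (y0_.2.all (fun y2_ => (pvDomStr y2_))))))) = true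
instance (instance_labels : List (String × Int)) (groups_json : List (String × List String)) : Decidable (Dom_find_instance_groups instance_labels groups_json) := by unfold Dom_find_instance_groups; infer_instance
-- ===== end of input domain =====

-- B replaces A's per-label scan of all groups by a one-pass inverted index label→groups (objective: faster).
-- Both arguments are Python dicts; each List argument is read as the dict it denotes (PySem.Dict.ofList).

-- ===== PORT A =====
def find_instance_groups (instance_labels : List (String × Int)) (groups_json : List (String × List String)) : List (String × Int) :=
  let d1 : PySem.Dict String Int := PySem.Dict.ofList instance_labels
  let d2 : PySem.Dict String (List String) := PySem.Dict.ofList groups_json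
  let final : PySem.Dict String Int :=
    d1.keys.foldl (fun ig label =>
      -- temp_groups = []; for group in groups_json: …
      let r := d2.keys.foldl (fun (st : PySem.Dict String Int × List String) group =>
        if label ∈ d2.getD group [] then
          (if st.1.contains group then st.1.insert group (st.1.getD group 0 + d1.getD label 0)
           else st.1.insert group (d1.getD label 0),
           st.2 ++ [group])
        else st) (ig, ([] : List String))
      if r.2.length = 0 then r.1.insert label (d1.getD label 0) else r.1) PySem.Dict.empty
  final.items

-- ===== PORT B =====
def find_instance_groups_alt (instance_labels : List (String × Int)) (groups_json : List (String × List String)) : List (String × Int) :=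
  let d1 : PySem.Dict String Int := PySem.Dict.ofList instance_labels
  let d2 : PySem.Dict String (List String) := PySem.Dict.ofList groups_json
  -- inverted index: for group, members in groups_json.items(): for lab in dict.fromkeys(members): inverted.setdefault(lab, []).append(group)
  let inverted : PySem.Dict String (List String) :=
    d2.items.foldl (fun inv gp =>
      (PySem.List.dedup gp.2).foldl (fun inv lab => inv.modify lab [] (fun gs => gs ++ [gp.1])) inv)
      PySem.Dict.empty
  let out : PySem.Dict String Int :=
    d1.items.foldl (fun o p =>
      let gs := inverted.getD p.1 []
      if gs = [] then o.insert p.1 p.2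
      else gs.foldl (fun o g => o.insert g (o.getD g 0 + p.2)) o) PySem.Dict.empty
  out.items

-- ===== PRECONDITION & SPEC =====
def Spec_find_instance_groups (instance_labels : List (String × Int)) (groups_json : List (String × List String)) (out : List (String × Int)) : Prop := out = find_instance_groups_alt instance_labels groups_json
instance (instance_labels : List (String × Int)) (groups_json : List (String × List String)) (out : List (String × Int)) : Decidable (Spec_find_instance_groups instance_labels groups_json out) := by unfold Spec_find_instance_groups; infer_instance

-- ===== CLAIM (what is proved, stated in full; the proofs are below) =====
def Claim_equal_find_instance_groups : Prop := ∀ (instance_labels : List (String × Int)) (groups_json : List (String × List String)), Dom_find_instance_groups instance_labels groups_json → Spec_find_instance_groups instance_labels groups_json (find_instance_groups instance_labels groups_json)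

-- ===== LEMMAS AND PROOFS =====

-- the groups (in order) whose member list contains lab
def pvMatched (lab : String) (l : List (String × List String)) : List String :=
  (l.filter (fun p => decide (lab ∈ p.2))).map (·.1)

theorem pvMatched_nil (lab : String) : pvMatched lab [] = [] := rfl

theorem pvMatched_cons (lab : String) (p : String × List String) (t : List (String × List String)) :
    pvMatched lab (p :: t) = if lab ∈ p.2 then p.1 :: pvMatched lab t else pvMatched lab t := by
  by_cases h : lab ∈ p.2 <;> simp [pvMatched, h]

-- the flattened (label, group) pair list the inverted-index fold runs over, filtered at lab, yields pvMatched
theorem pv_flat_filter (lab : String) (l : List (String × List String)) :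
    (List.filter (fun p => p.1 == lab)
        (l.flatMap (fun gp => (PySem.List.dedup gp.2).map (fun x => (x, gp.1))))).map (·.2)
      = pvMatched lab l := by
  induction l with
  | nil => rfl
  | cons gp t ih =>
    rw [List.flatMap_cons, List.filter_append, List.map_append, ih, pvMatched_cons]
    have hhead : (List.filter (fun p => p.1 == lab) ((PySem.List.dedup gp.2).map (fun x => (x, gp.1)))).map (·.2)
        = if lab ∈ gp.2 then [gp.1] else [] := by
      rw [List.filter_map]
      have : ((fun p => p.1 == lab) ∘ (fun x => (x, gp.1))) = (fun x => x == lab) := rfl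
      rw [this, List.filter_beq]
      by_cases h : lab ∈ gp.2
      · simp [h]
      · have hm : lab ∉ PySem.Set.ofList gp.2 := fun hc => h ((PySem.Set.mem_ofList gp.2 lab).mp hc)
        have h0 : List.count lab (PySem.Set.ofList gp.2) = 0 := List.count_eq_zero_of_not_mem hm
        simp [h, h0]
    rw [hhead]
    by_cases h : lab ∈ gp.2 <;> simp [h]

-- lookup in B's inverted index
theorem pv_inverted_getD (items2 : List (String × List String)) (lab : String) :
    (items2.foldl (fun inv gp =>
        (PySem.List.dedup gp.2).foldl (fun inv l => inv.modify l [] (fun gs => gs ++ [gp.1])) inv)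
        (PySem.Dict.empty : PySem.Dict String (List String))).getD lab []
      = pvMatched lab items2 := by
  have hshape : (items2.foldl (fun inv gp =>
        (PySem.List.dedup gp.2).foldl (fun inv l => inv.modify l [] (fun gs => gs ++ [gp.1])) inv)
        (PySem.Dict.empty : PySem.Dict String (List String)))
      = (items2.flatMap (fun gp => (PySem.List.dedup gp.2).map (fun x => (x, gp.1)))).foldl
          (fun d p => d.modify p.1 [] (fun gs => gs ++ [p.2])) PySem.Dict.empty := by
    rw [List.foldl_flatMap]
    simp [List.foldl_map]
  rw [hshape, PySem.Dict.getD_foldl_modify_append, pv_flat_filter]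
  simp [PySem.Dict.getD_empty]

-- A's inner loop over the (group, members) pairs, characterised
theorem pv_innerA (lab : String) (w : Int) (l : List (String × List String))
    (ig : PySem.Dict String Int) (acc : List String) :
    l.foldl (fun (st : PySem.Dict String Int × List String) p =>
        if lab ∈ p.2 then
          (if st.1.contains p.1 then st.1.insert p.1 (st.1.getD p.1 0 + w)
           else st.1.insert p.1 w,
           st.2 ++ [p.1])
        else st) (ig, acc)
      = ((pvMatched lab l).foldl (fun o g => o.insert g (o.getD g 0 + w)) ig,
         acc ++ pvMatched lab l) := by
  induction l generalizing ig acc with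
  | nil => simp [pvMatched_nil]
  | cons p t ih =>
    rw [List.foldl_cons, pvMatched_cons]
    by_cases h : lab ∈ p.2
    · simp only [h, if_pos]
      have hins : (if ig.contains p.1 then ig.insert p.1 (ig.getD p.1 0 + w) else ig.insert p.1 w)
          = ig.insert p.1 (ig.getD p.1 0 + w) := by
        by_cases hc : ig.contains p.1
        · simp [hc]
        · have : ig.getD p.1 0 = 0 :=
            PySem.Dict.getD_of_not_contains ig 0 (by simpa using hc)
          simp [hc, this]
      rw [hins, ih]
      simp [List.foldl_cons]
    · simp [h, ih]

theorem find_instance_groups_spec_aux (instance_labels : List (String × Int)) (groups_json : List (String × List String)) :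
    find_instance_groups instance_labels groups_json = find_instance_groups_alt instance_labels groups_json := by
  unfold find_instance_groups find_instance_groups_alt
  simp only []
  set d1 : PySem.Dict String Int := PySem.Dict.ofList instance_labels with hd1
  set d2 : PySem.Dict String (List String) := PySem.Dict.ofList groups_json with hd2
  congr 1
  -- both outer folds run over d1's items; rewrite A's keys-fold as an items-fold
  have hkeys1 : d1.keys = d1.items.map (·.1) := rfl
  have hkeys2 : d2.keys = d2.items.map (·.1) := rfl
  rw [hkeys1, List.foldl_map]
  apply PySem.List.foldl_congr_mem
  intro ig p hp
  -- inside one outer step: lab := p.1, and d1.getD p.1 0 = p.2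
  have hw : d1.getD p.1 0 = p.2 := by
    have hpmem : (p.1, p.2) ∈ d1.items := by simpa using hp
    exact PySem.Dict.getD_of_mem_items d1 hpmem (PySem.Dict.nodup_keys_ofList _) 0
  rw [hw]
  -- rewrite A's inner keys-fold as an items-fold with the member lists looked up
  rw [hkeys2, List.foldl_map]
  have hinner : d2.items.foldl (fun (st : PySem.Dict String Int × List String) q =>
        if p.1 ∈ d2.getD q.1 [] then
          (if st.1.contains q.1 then st.1.insert q.1 (st.1.getD q.1 0 + p.2)
           else st.1.insert q.1 p.2,
           st.2 ++ [q.1])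
        else st) (ig, ([] : List String))
      = d2.items.foldl (fun (st : PySem.Dict String Int × List String) q =>
        if p.1 ∈ q.2 then
          (if st.1.contains q.1 then st.1.insert q.1 (st.1.getD q.1 0 + p.2)
           else st.1.insert q.1 p.2,
           st.2 ++ [q.1])
        else st) (ig, ([] : List String)) := by
    apply PySem.List.foldl_congr_mem
    intro st q hq
    have hv : d2.getD q.1 [] = q.2 := by
      have hqmem : (q.1, q.2) ∈ d2.items := by simpa using hq
      exact PySem.Dict.getD_of_mem_items d2 hqmem (PySem.Dict.nodup_keys_ofList _) []
    rw [hv]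
  rw [hinner, pv_innerA p.1 p.2 d2.items ig [], pv_inverted_getD d2.items p.1]
  by_cases hm : pvMatched p.1 d2.items = []
  · simp [hm]
  · have hlen : ¬ (pvMatched p.1 d2.items).length = 0 := by
      simpa [List.length_eq_zero_iff] using hm
    simp [hm, hlen]

-- ===== VERDICT (by name: the statement is the Claim_ definition above) =====
theorem find_instance_groups_spec : Claim_equal_find_instance_groups := by
  intro instance_labels groups_json _
  exact find_instance_groups_spec_aux instance_labels groups_json
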